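-- pv_equiv track=rewrite | github.com/Magic-near/Reshatel | bot.py | convert_from_symmetric
-- ===== SOURCE A (Python) =====
-- def convert_from_symmetric(data, source):
--     valid_symbols = ["'", "‘"]
--     for i in range(-int(source) // 2 + 1, int(source) // 2 + 1):
--         valid_symbols.append(str(i))
--     for ch in data:
--         if ch not in valid_symbols:
--             return 'Неверный формат данных'
--     if data[-1] == "'" or data[-1] == "‘":
--         return 'Апостроф ставится перед числом'
--     if int(source) > 20:
--         return "Основание СС должно быть меньше 20"
--     data = data[::-1]
--     result = 0
--     power = 0
--     for i in range(len(data)):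
--         if data[i] != "'" and data[i] != "‘":
--             if i < len(data) - 1:
--                 if data[i+1] == "'" or data[i+1] == "‘":
--                     result -= int(data[i]) * int(source) ** power
--                 else:
--                     result += int(data[i]) * int(source) ** power
--             else:
--                 result += int(data[i]) * int(source) ** power
--             power += 1
--     return str(result)
-- ===== SOURCE B (Python) =====
-- def convert_from_symmetric(data, source):
--     lo = -source // 2 + 1
--     hi = source // 2
--     for ch in data:
--         if not (ch == "'" or ch == "\u2018" or ('0' <= ch <= '9' and lo <= int(ch) <= hi)):
--             return 'Неверный формат данных'
--     if data[-1] == "'" or data[-1] == "\u2018":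
--         return 'Апостроф ставится перед числом'
--     if source > 20:
--         return "Основание СС должно быть меньше 20"
--     result = 0
--     prev_apo = False
--     for ch in data:
--         if ch == "'" or ch == "\u2018":
--             prev_apo = True
--         else:
--             d = int(ch)
--             result = result * source + (-d if prev_apo else d)
--             prev_apo = False
--     return str(result)
-- ===== Notes on version B (the rewrite author's own statement) =====
-- stated objective: faster
-- what changed: B drops A's materialized valid_symbols list (size ~|source|/2, scanned per character) in favour of a constant-time apostrophe/digit-range test, and replaces A's reversed-string loop that recomputes source**power for every digit by a single left-to-right Horner pass.
import Mathlib
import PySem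

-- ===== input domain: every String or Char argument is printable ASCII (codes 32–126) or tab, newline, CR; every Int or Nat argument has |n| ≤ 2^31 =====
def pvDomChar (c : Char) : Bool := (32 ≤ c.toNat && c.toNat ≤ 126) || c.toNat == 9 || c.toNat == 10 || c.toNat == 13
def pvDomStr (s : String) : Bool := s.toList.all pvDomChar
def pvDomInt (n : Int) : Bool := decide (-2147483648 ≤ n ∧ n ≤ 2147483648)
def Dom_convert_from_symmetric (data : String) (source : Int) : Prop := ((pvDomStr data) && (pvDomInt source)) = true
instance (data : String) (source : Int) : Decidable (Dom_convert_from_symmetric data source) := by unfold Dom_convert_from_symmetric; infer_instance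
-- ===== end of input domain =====

-- B replaces A's O(|source|)-element valid-symbol list and per-digit source**power computation by a
-- direct digit-range test and a single left-to-right Horner pass (objective: faster; return value only).

-- ===== PORT A =====
-- int(ch) for a single character (both Pythons call int only on one digit character, never on an apostrophe)
def pvDigit (c : Char) : Int := (PySem.Int.ofChars? [c]).getD 0

-- the loop 'for i in range(len(data))' over the reversed string, reading data[i] and data[i+1]:
-- structural recursion on the reversed character list; 'i < len(data) - 1' ⟺ the tail is nonempty,
-- and data[i+1] is the head of the tail.  Same state (result, power) as the Python.
def pvA_loop (source : Int) (rev : List Char) (result : Int) (power : Nat) : Int :=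
  match rev with
  | [] => result
  | c :: rest =>
    if c ≠ '\'' ∧ c ≠ '‘' then
      let term := pvDigit c * source ^ power
      let result :=
        match rest with
        | c2 :: _ => if c2 = '\'' ∨ c2 = '‘' then result - term else result + term
        | [] => result + term
      pvA_loop source rest result (power + 1)
    else pvA_loop source rest result power

def convert_from_symmetric (data : String) (source : Int) : String :=
  -- valid_symbols = ["'", "‘"] + [str(i) for i in range(-source//2+1, source//2+1)], kept at char-list level
  -- 'for ch in data: if ch not in valid_symbols: return …' — early return ⟺ some character fails
  if data.toList.any (fun ch =>
      !(([['\''], ['‘']] ++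
          (PySem.List.pyRange (PySem.Int.floordiv (-source) 2 + 1) (PySem.Int.floordiv source 2 + 1) 1).map
            PySem.Int.toChars).contains [ch])) then
    "Неверный формат данных"
  else
    match PySem.Str.pyGet? data (-1) with     -- data[-1]; none = IndexError, excluded by Pre_
    | none => ""
    | some last =>
      if last = '\'' ∨ last = '‘' then "Апостроф ставится перед числом"
      else if source > 20 then "Основание СС должно быть меньше 20"
      else
        -- data = data[::-1] (PySem.Str.slice?_none_none_neg_one: [::-1] is reverse), then the loop
        PySem.Int.toStr (pvA_loop source data.toList.reverse 0 0)

-- ===== PORT B =====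
def pvIsApo (c : Char) : Bool := c == '\'' || c == '‘'

-- single left-to-right Horner pass; prevApo remembers whether the previous character was an apostrophe
def pvB_loop (source : Int) (chars : List Char) (result : Int) (prevApo : Bool) : Int :=
  match chars with
  | [] => result
  | c :: rest =>
    if pvIsApo c then pvB_loop source rest result true
    else pvB_loop source rest (result * source + (if prevApo then -pvDigit c else pvDigit c)) false

def convert_from_symmetric_alt (data : String) (source : Int) : String :=
  if data.toList.any (fun ch =>
      !(pvIsApo ch || (decide ('0' ≤ ch) && decide (ch ≤ '9') &&
          decide (PySem.Int.floordiv (-source) 2 + 1 ≤ pvDigit ch) &&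
          decide (pvDigit ch ≤ PySem.Int.floordiv source 2)))) then
    "Неверный формат данных"
  else
    match PySem.Str.pyGet? data (-1) with     -- data[-1]; none = IndexError, excluded by Pre_
    | none => ""
    | some last =>
      if pvIsApo last then "Апостроф ставится перед числом"
      else if source > 20 then "Основание СС должно быть меньше 20"
      else PySem.Int.toStr (pvB_loop source data.toList 0 false)

-- ===== PRECONDITION & SPEC =====
-- Python A evaluates data[-1] and raises IndexError exactly when data is empty; Pre_ excludes only that.
def Pre_convert_from_symmetric (data : String) (source : Int) : Prop := data ≠ ""
instance (data : String) (source : Int) : Decidable (Pre_convert_from_symmetric data source) := by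
  unfold Pre_convert_from_symmetric; infer_instance

def pvWitness_convert_from_symmetric : String × Int := ("1'2", 4)

def Spec_convert_from_symmetric (data : String) (source : Int) (out : String) : Prop := out = convert_from_symmetric_alt data source
instance (data : String) (source : Int) (out : String) : Decidable (Spec_convert_from_symmetric data source out) := by unfold Spec_convert_from_symmetric; infer_instance

-- ===== CLAIM (what is proved, stated in full; the proofs are below) =====
def Claim_equal_convert_from_symmetric : Prop := ∀ (data : String) (source : Int), Dom_convert_from_symmetric data source → Pre_convert_from_symmetric data source → Spec_convert_from_symmetric data source (convert_from_symmetric data source)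

-- ===== LEMMAS AND PROOFS =====

-- Nat.toDigitsCore always prepends at least one digit
theorem pvToDigitsCore_len (f : Nat) : ∀ (n : Nat) (ds : List Char),
    ds.length + 1 ≤ (Nat.toDigitsCore 10 (f + 1) n ds).length := by
  induction f with
  | zero =>
    intro n ds
    rw [Nat.toDigitsCore]
    split
    · simp
    · rw [Nat.toDigitsCore]; simp
  | succ g ih =>
    intro n ds
    rw [Nat.toDigitsCore]
    split
    · simp
    · have := ih (n / 10) (Nat.digitChar (n % 10) :: ds)
      simp only [List.length_cons] at this
      omega

theorem pvToDigitsCore_len_two (f : Nat) (n : Nat) (ds : List Char) (hn : 10 ≤ n) :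
    ds.length + 2 ≤ (Nat.toDigitsCore 10 (f + 2) n ds).length := by
  rw [Nat.toDigitsCore]
  have hne : ¬ n / 10 = 0 := by omega
  rw [if_neg hne]
  have := pvToDigitsCore_len f (n / 10) (Nat.digitChar (n % 10) :: ds)
  simp only [List.length_cons] at this
  omega

-- str(m) for m ≥ 10 has at least two characters
theorem pvToDigits_len_ge_two (m : Nat) (hm : 10 ≤ m) : 2 ≤ (Nat.toDigits 10 m).length := by
  unfold Nat.toDigits
  rw [show m + 1 = (m - 1) + 2 by omega]
  have := pvToDigitsCore_len_two (m - 1) m [] hm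
  simpa using this

theorem pvToDigits_ne_nil (m : Nat) : Nat.toDigits 10 m ≠ [] := by
  intro h
  have := pvToDigitsCore_len m m []
  unfold Nat.toDigits at h
  rw [h] at this
  simp at this

-- str(i) is the single character c iff 0 ≤ i ≤ 9 and c is i's digit character
theorem pvToChars_singleton (i : Int) (c : Char) :
    PySem.Int.toChars i = [c] ↔ 0 ≤ i ∧ i ≤ 9 ∧ c = Nat.digitChar i.toNat := by
  constructor
  · intro h
    unfold PySem.Int.toChars at h
    split at h
    · exfalso
      have h1 : Nat.toDigits 10 i.natAbs = [] := by
        cases hx : Nat.toDigits 10 i.natAbs with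
        | nil => rfl
        | cons a t => rw [hx] at h; simp at h
      exact pvToDigits_ne_nil _ h1
    · rename_i hpos
      push Not at hpos
      by_cases h10 : 10 ≤ i.toNat
      · have := pvToDigits_len_ge_two i.toNat h10
        rw [h] at this
        simp at this
      · have h0 : 0 ≤ i := hpos
        have h9 : i ≤ 9 := by omega
        refine ⟨h0, h9, ?_⟩
        interval_cases i <;> (injection h with h1 h2; exact h1.symm)
  · rintro ⟨h0, h9, rfl⟩
    interval_cases i <;> decide

theorem pvDigit_digitChar (i : Int) (h0 : 0 ≤ i) (h9 : i ≤ 9) :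
    pvDigit (Nat.digitChar i.toNat) = i ∧ '0' ≤ Nat.digitChar i.toNat ∧ Nat.digitChar i.toNat ≤ '9' := by
  interval_cases i <;> decide

-- the ten digit characters
theorem pvDigitCharCases (ch : Char) (h1 : '0' ≤ ch) (h2 : ch ≤ '9') :
    ch ∈ ['0','1','2','3','4','5','6','7','8','9'] := by
  have hb : 48 ≤ ch.toNat ∧ ch.toNat ≤ 57 := by
    simp [Char.le_def, UInt32.le_iff_toNat_le] at h1 h2
    exact ⟨h1, h2⟩
  have hofn := Char.ofNat_toNat ch
  obtain ⟨hlo, hhi⟩ := hb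
  interval_cases h : ch.toNat <;> rw [← hofn] <;> decide

-- A's membership test in valid_symbols ⟺ B's direct condition, for every character
theorem pvValid_eq (source : Int) (ch : Char) :
    ([['\''], ['‘']] ++
      (PySem.List.pyRange (PySem.Int.floordiv (-source) 2 + 1) (PySem.Int.floordiv source 2 + 1) 1).map
        PySem.Int.toChars).contains [ch]
    = (pvIsApo ch || (decide ('0' ≤ ch) && decide (ch ≤ '9') &&
        decide (PySem.Int.floordiv (-source) 2 + 1 ≤ pvDigit ch) &&
        decide (pvDigit ch ≤ PySem.Int.floordiv source 2))) := by
  rw [Bool.eq_iff_iff]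
  simp only [List.contains_eq_mem, List.mem_append, List.mem_cons, List.mem_map,
    List.not_mem_nil, or_false, decide_eq_true_eq, Bool.or_eq_true, Bool.and_eq_true,
    List.mem_singleton]
  constructor
  · rintro ((h | h) | ⟨i, himem, hi_eq⟩)
    · left; simp only [List.cons.injEq, and_true] at h; simp [pvIsApo, h]
    · left; simp only [List.cons.injEq, and_true] at h; simp [pvIsApo, h]
    · right
      rw [pvToChars_singleton] at hi_eq
      obtain ⟨h0, h9, rfl⟩ := hi_eq
      rw [PySem.List.mem_pyRange_one] at himem
      obtain ⟨hd, hc0, hc9⟩ := pvDigit_digitChar i h0 h9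
      refine ⟨⟨⟨by simpa using hc0, by simpa using hc9⟩, ?_⟩, ?_⟩
      · rw [hd]; exact himem.1
      · rw [hd]; have := himem.2; omega
  · rintro (h | ⟨⟨⟨h1, h2⟩, h3⟩, h4⟩)
    · simp only [pvIsApo, Bool.or_eq_true, beq_iff_eq] at h
      rcases h with h | h <;> simp [h]
    · right
      have hmem := pvDigitCharCases ch h1 h2
      fin_cases hmem <;>
        exact ⟨pvDigit _, PySem.List.mem_pyRange_one.mpr ⟨h3, by omega⟩,
          (pvToChars_singleton _ _).mpr (by refine ⟨by decide, by decide, by decide⟩)⟩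

-- signed digit list, left to right (sign from the preceding character)
def pvSD (prev : Bool) : List Char → List Int
  | [] => []
  | c :: cs => if pvIsApo c then pvSD true cs else (if prev then -pvDigit c else pvDigit c) :: pvSD false cs

-- the apostrophe flag after consuming xs
def pvFA (prev : Bool) : List Char → Bool
  | [] => prev
  | c :: cs => pvFA (pvIsApo c) cs

theorem pvSD_append (xs : List Char) : ∀ (prev : Bool) (ys : List Char),
    pvSD prev (xs ++ ys) = pvSD prev xs ++ pvSD (pvFA prev xs) ys := by
  induction xs with
  | nil => intro prev ys; simp [pvSD, pvFA]
  | cons c cs ih =>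
    intro prev ys
    simp only [List.cons_append, pvSD, pvFA]
    by_cases h : pvIsApo c = true <;> simp [h, ih]

theorem pvFA_head_reverse (xs : List Char) : ∀ prev,
    pvFA prev xs = (match xs.reverse with | [] => prev | c :: _ => pvIsApo c) := by
  induction xs with
  | nil => intro prev; simp [pvFA]
  | cons c cs ih =>
    intro prev
    simp only [pvFA, List.reverse_cons, ih (pvIsApo c)]
    cases h : cs.reverse with
    | nil => simp
    | cons x t => simp

-- B's loop is a Horner fold over the signed digit list
theorem pvB_loop_eq (source : Int) (l : List Char) : ∀ (r : Int) (prev : Bool),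
    pvB_loop source l r prev = (pvSD prev l).foldl (fun a x => a * source + x) r := by
  induction l with
  | nil => intro r prev; simp [pvB_loop, pvSD]
  | cons c cs ih =>
    intro r prev
    simp only [pvB_loop, pvSD]
    by_cases h : pvIsApo c = true <;> simp [h, ih]

-- A's value on a reversed suffix, lowest power first
def pvAV (source : Int) : List Char → Int
  | [] => 0
  | c :: rest =>
    if pvIsApo c then pvAV source rest
    else (if (match rest with | [] => false | c2 :: _ => pvIsApo c2) then -pvDigit c else pvDigit c)
           + source * pvAV source rest

theorem pvA_loop_eq (source : Int) (rev : List Char) : ∀ (r : Int) (p : Nat),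
    pvA_loop source rev r p = r + source ^ p * pvAV source rev := by
  induction rev with
  | nil => intro r p; simp [pvA_loop, pvAV]
  | cons c rest ih =>
    intro r p
    simp only [pvA_loop, pvAV]
    by_cases h : pvIsApo c = true
    · have hc : ¬(c ≠ '\'' ∧ c ≠ '‘') := by
        simp only [pvIsApo, Bool.or_eq_true, beq_iff_eq] at h
        rcases h with h | h <;> simp [h]
      rw [if_neg hc, if_pos h, ih]
    · have hc : c ≠ '\'' ∧ c ≠ '‘' := by
        simp only [pvIsApo, Bool.or_eq_true, beq_iff_eq] at h
        push Not at h
        exact h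
      rw [if_pos hc, if_neg h]
      cases rest with
      | nil =>
        dsimp only
        rw [ih]
        simp only [pvAV, Bool.false_eq_true, if_false, pow_succ]
        ring
      | cons c2 t =>
        dsimp only
        by_cases h2 : pvIsApo c2 = true
        · have hcc : c2 = '\'' ∨ c2 = '‘' := by
            simp only [pvIsApo, Bool.or_eq_true, beq_iff_eq] at h2
            exact h2
          rw [if_pos hcc]
          simp only [ih, h2, pow_succ]
          rw [if_pos (trivial : True)]
          ring
        · have hcc : ¬(c2 = '\'' ∨ c2 = '‘') := by
            simp only [pvIsApo, Bool.or_eq_true, beq_iff_eq] at h2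
            exact h2
          rw [if_neg hcc]
          simp only [ih, h2, Bool.false_eq_true, if_false, pow_succ]
          ring

-- the two loop results agree
theorem pvLoops_eq (source : Int) (l : List Char) :
    pvA_loop source l.reverse 0 0 = pvB_loop source l 0 false := by
  rw [pvA_loop_eq, pvB_loop_eq]
  simp only [pow_zero, one_mul, zero_add]
  induction l using List.reverseRecOn with
  | nil => simp [pvAV, pvSD]
  | append_singleton xs c ih =>
    have hrev : (xs ++ [c]).reverse = c :: xs.reverse := by simp
    rw [pvSD_append, List.foldl_append, hrev]
    by_cases h : pvIsApo c = true
    · simp [pvAV, h, pvSD, ih]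
    · simp only [pvAV, h, Bool.false_eq_true, if_false]
      rw [pvFA_head_reverse]
      simp only [pvSD, h, Bool.false_eq_true, if_false]
      cases hx : xs.reverse with
      | nil =>
        have : xs = [] := by simpa using congrArg List.reverse hx
        subst this
        simp [pvSD, pvAV]
      | cons y t =>
        simp only [List.foldl_cons, List.foldl_nil, ← ih, hx]
        ring

-- ===== VERDICT (by name: the statement is the Claim_ definition above) =====
theorem convert_from_symmetric_spec : Claim_equal_convert_from_symmetric := by
  intro data source _dom _pre
  unfold Spec_convert_from_symmetric convert_from_symmetric convert_from_symmetric_alt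
  have hany : (data.toList.any (fun ch =>
      !(([['\''], ['‘']] ++
          (PySem.List.pyRange (PySem.Int.floordiv (-source) 2 + 1) (PySem.Int.floordiv source 2 + 1) 1).map
            PySem.Int.toChars).contains [ch])))
      = (data.toList.any (fun ch =>
      !(pvIsApo ch || (decide ('0' ≤ ch) && decide (ch ≤ '9') &&
          decide (PySem.Int.floordiv (-source) 2 + 1 ≤ pvDigit ch) &&
          decide (pvDigit ch ≤ PySem.Int.floordiv source 2))))) := by
    apply congrArg
    funext ch
    rw [pvValid_eq]
  rw [hany]
  cases h : (data.toList.any (fun ch =>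
      !(pvIsApo ch || (decide ('0' ≤ ch) && decide (ch ≤ '9') &&
          decide (PySem.Int.floordiv (-source) 2 + 1 ≤ pvDigit ch) &&
          decide (pvDigit ch ≤ PySem.Int.floordiv source 2))))) with
  | true => simp
  | false =>
    simp only [Bool.false_eq_true, if_false]
    cases hlast : PySem.Str.pyGet? data (-1) with
    | none => rfl
    | some last =>
      dsimp only
      have hcond : (last = '\'' ∨ last = '‘') ↔ (pvIsApo last = true) := by
        simp [pvIsApo]
      by_cases hc : last = '\'' ∨ last = '‘'
      · rw [if_pos hc, if_pos (hcond.mp hc)]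
      · rw [if_neg hc, if_neg (fun hb => hc (hcond.mpr hb))]
        by_cases hs : source > 20
        · rw [if_pos hs, if_pos hs]
        · rw [if_neg hs, if_neg hs]
          rw [pvLoops_eq]
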